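-- pv_equiv track=rewrite | github.com/axeltanjung/hiragana_project | src/main.py | convert_to_hiragana
-- ===== SOURCE A (Python) =====
-- alphabet_to_hiragana = {
--     # Additional single characters
--     'ka': 'か', 'ki': 'き', 'ku': 'く', 'ke': 'け', 'ko': 'こ',
--     'sa': 'さ', 'shi': 'し', 'su': 'す', 'se': 'せ', 'so': 'そ',
--     'ta': 'た', 'chi': 'ち', 'tsu': 'つ', 'te': 'て', 'to': 'と',
--     'na': 'な', 'ni': 'に', 'nu': 'ぬ', 'ne': 'ね', 'no': 'の',
--     'ha': 'は', 'hi': 'ひ', 'fu': 'ふ', 'he': 'へ', 'ho': 'ほ',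
--     'ma': 'ま', 'mi': 'み', 'mu': 'む', 'me': 'め', 'mo': 'も',
--     'ya': 'や', 'yu': 'ゆ', 'yo': 'よ',
--     'ra': 'ら', 'ri': 'り', 'ru': 'る', 're': 'れ', 'ro': 'ろ',
--     'wa': 'わ', 'wo': 'を',
--     'n': 'ん',
--
--     # Diacritical marks (Dakuten and Handakuten)
--     'ga': 'が', 'gi': 'ぎ', 'gu': 'ぐ', 'ge': 'げ', 'go': 'ご',
--     'za': 'ざ', 'ji': 'じ', 'zu': 'ず', 'ze': 'ぜ', 'zo': 'ぞ',
--     'da': 'だ', 'ji': 'ぢ', 'zu': 'づ', 'de': 'で', 'do': 'ど',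
--     'ba': 'ば', 'bi': 'び', 'bu': 'ぶ', 'be': 'べ', 'bo': 'ぼ',
--     'pa': 'ぱ', 'pi': 'ぴ', 'pu': 'ぷ', 'pe': 'ぺ', 'po': 'ぽ',
--
--     # Modified sounds (Yōon - combinations with 'ya', 'yu', 'yo')
--     'kya': 'きゃ', 'kyu': 'きゅ', 'kyo': 'きょ',
--     'sha': 'しゃ', 'shu': 'しゅ', 'sho': 'しょ',
--     'cha': 'ちゃ', 'chu': 'ちゅ', 'cho': 'ちょ',
--     'nya': 'にゃ', 'nyu': 'にゅ', 'nyo': 'にょ',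
--     'hya': 'ひゃ', 'hyu': 'ひゅ', 'hyo': 'ひょ',
--     'mya': 'みゃ', 'myu': 'みゅ', 'myo': 'みょ',
--     'rya': 'りゃ', 'ryu': 'りゅ', 'ryo': 'りょ',
--     'gya': 'ぎゃ', 'gyu': 'ぎゅ', 'gyo': 'ぎょ',
--     'ja': 'じゃ', 'ju': 'じゅ', 'jo': 'じょ',
--     'bya': 'びゃ', 'byu': 'びゅ', 'byo': 'びょ',
--     'pya': 'ぴゃ', 'pyu': 'ぴゅ', 'pyo': 'ぴょ',
--
--     # Other Yōon Combinations (Wago/Loanwords)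
--     'wa': 'わ', 'wi': 'うぃ', 'we': 'うぇ', 'wo': 'を',
--     'vu': 'ゔ', 've': 'ゔぇ', 'vi': 'ゔぃ',
--     'si': 'し', 'ti': 'ち', 'di': 'ぢ',
--     'chi': 'ち', 'tsu': 'つ', 'tu': 'つ',
--
--     'a': 'あ', 'e': 'え', 'i': 'い', 'o': 'お', 'u': 'う'
-- }
--
-- def convert_to_hiragana(text):
--     hiragana_text = ""
--     i = 0
--     while i < len(text):
--         # Check for 2-character and 3-character combinations first
--         if i + 1 < len(text) and text[i:i+2].lower() in alphabet_to_hiragana: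
--             hiragana_text += alphabet_to_hiragana[text[i:i+2].lower()]
--             i += 2
--         elif i + 2 < len(text) and text[i:i+3].lower() in alphabet_to_hiragana:
--             hiragana_text += alphabet_to_hiragana[text[i:i+3].lower()]
--             i += 3
--         # Otherwise check for 1-character mapping
--         elif text[i].lower() in alphabet_to_hiragana:
--             hiragana_text += alphabet_to_hiragana[text[i].lower()]
--             i += 1
--         else:
--             # If no match, add the character as is (e.g., for non-matching characters like spaces or punctuation)
--             hiragana_text += text[i]
--             i += 1
--     return hiragana_text
-- ===== SOURCE B (Python) =====
-- import re
--
-- def _build_table():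
--     # The romaji table generated compositionally: gojuon rows (prefix x vowels x
--     # kana), the palatalised (yoon) combinations, and irregular / loanword
--     # spellings applied last (later assignments overwrite, as in a dict literal).
--     table = {}
--     def row(prefix, vowels, kana, irregular={}):
--         for v, k in zip(vowels, kana):
--             table[irregular.get(v, prefix + v)] = k
--     row("",  "aiueo", "あいうえお")
--     row("k", "aiueo", "かきくけこ")
--     row("s", "aiueo", "さしすせそ", {"i": "shi"})
--     row("t", "aiueo", "たちつてと", {"i": "chi", "u": "tsu"})
--     row("n", "aiueo", "なにぬねの")
--     row("h", "aiueo", "はひふへほ", {"u": "fu"})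
--     row("m", "aiueo", "まみむめも")
--     row("y", "auo",   "やゆよ")
--     row("r", "aiueo", "らりるれろ")
--     row("w", "ao",    "わを")
--     row("g", "aiueo", "がぎぐげご")
--     row("z", "aiueo", "ざじずぜぞ", {"i": "ji", "u": "zu"})
--     row("d", "aiueo", "だぢづでど", {"i": "ji", "u": "zu"})
--     row("b", "aiueo", "ばびぶべぼ")
--     row("p", "aiueo", "ぱぴぷぺぽ")
--     for prefix, base in [("ky", "き"), ("sh", "し"), ("ch", "ち"), ("ny", "に"),
--                          ("hy", "ひ"), ("my", "み"), ("ry", "り"), ("gy", "ぎ"),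
--                          ("j", "じ"), ("by", "び"), ("py", "ぴ")]:
--         row(prefix, "auo", [base + "ゃ", base + "ゅ", base + "ょ"])
--     row("", ["n", "wi", "we", "vu", "ve", "vi", "si", "ti", "di", "tu"],
--             ["ん", "うぃ", "うぇ", "ゔ", "ゔぇ", "ゔぃ", "し", "ち", "ぢ", "つ"])
--     return table
--
-- _table = _build_table()
--
-- # One regex of all romaji keys, longest first: the engine does the greedy
-- # longest-match scan; unmatched characters are left untouched by re.sub.
-- _pattern = re.compile("|".join(sorted(_table, key=lambda k: -len(k))), re.IGNORECASE)
--
-- def convert_to_hiragana(text):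
--     return _pattern.sub(lambda m: _table[m.group(0).lower()], text)
-- ===== Notes on version B (the rewrite author's own statement) =====
-- stated objective: idiomatic
-- what changed: B generates the romaji table compositionally (gojuon rows as prefix x vowels x kana plus yoon and irregular-spelling rows) instead of one 115-entry dict literal, and replaces the hand-written per-position 2/3/1-length slice-and-lookup loop with one precompiled case-insensitive regex alternation of all keys sorted longest-first, letting re.sub do the whole scan-and-replace in one call.
import Mathlib
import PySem

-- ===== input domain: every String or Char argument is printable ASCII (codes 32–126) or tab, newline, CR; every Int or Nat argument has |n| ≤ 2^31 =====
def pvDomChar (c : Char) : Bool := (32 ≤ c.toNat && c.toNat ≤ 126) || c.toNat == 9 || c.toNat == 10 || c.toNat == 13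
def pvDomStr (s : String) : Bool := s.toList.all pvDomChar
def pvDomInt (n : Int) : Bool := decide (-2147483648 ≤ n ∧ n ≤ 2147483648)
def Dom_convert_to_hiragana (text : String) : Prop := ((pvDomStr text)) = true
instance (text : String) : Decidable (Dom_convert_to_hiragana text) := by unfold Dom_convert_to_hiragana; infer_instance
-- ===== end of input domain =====

-- B builds the romaji table compositionally (gojuon rows x vowels + yoon + irregular
-- spellings) instead of one literal dict, and replaces A's hand-coded 2/3/1-length trial
-- scan with one longest-first matcher (in Python: a compiled regex alternation, re.sub).
-- Objective: idiomatic. Return-value equivalence only; neither version mutates anything.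

-- ===== PORT A =====
def hiraganaPairs : List (String × String) := [
  ("ka", "か"), ("ki", "き"), ("ku", "く"), ("ke", "け"), ("ko", "こ"),
  ("sa", "さ"), ("shi", "し"), ("su", "す"), ("se", "せ"), ("so", "そ"),
  ("ta", "た"), ("chi", "ち"), ("tsu", "つ"), ("te", "て"), ("to", "と"),
  ("na", "な"), ("ni", "に"), ("nu", "ぬ"), ("ne", "ね"), ("no", "の"),
  ("ha", "は"), ("hi", "ひ"), ("fu", "ふ"), ("he", "へ"), ("ho", "ほ"),
  ("ma", "ま"), ("mi", "み"), ("mu", "む"), ("me", "め"), ("mo", "も"),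
  ("ya", "や"), ("yu", "ゆ"), ("yo", "よ"),
  ("ra", "ら"), ("ri", "り"), ("ru", "る"), ("re", "れ"), ("ro", "ろ"),
  ("wa", "わ"), ("wo", "を"),
  ("n", "ん"),
  ("ga", "が"), ("gi", "ぎ"), ("gu", "ぐ"), ("ge", "げ"), ("go", "ご"),
  ("za", "ざ"), ("ji", "じ"), ("zu", "ず"), ("ze", "ぜ"), ("zo", "ぞ"),
  ("da", "だ"), ("ji", "ぢ"), ("zu", "づ"), ("de", "で"), ("do", "ど"),
  ("ba", "ば"), ("bi", "び"), ("bu", "ぶ"), ("be", "べ"), ("bo", "ぼ"),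
  ("pa", "ぱ"), ("pi", "ぴ"), ("pu", "ぷ"), ("pe", "ぺ"), ("po", "ぽ"),
  ("kya", "きゃ"), ("kyu", "きゅ"), ("kyo", "きょ"),
  ("sha", "しゃ"), ("shu", "しゅ"), ("sho", "しょ"),
  ("cha", "ちゃ"), ("chu", "ちゅ"), ("cho", "ちょ"),
  ("nya", "にゃ"), ("nyu", "にゅ"), ("nyo", "にょ"),
  ("hya", "ひゃ"), ("hyu", "ひゅ"), ("hyo", "ひょ"),
  ("mya", "みゃ"), ("myu", "みゅ"), ("myo", "みょ"),
  ("rya", "りゃ"), ("ryu", "りゅ"), ("ryo", "りょ"),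
  ("gya", "ぎゃ"), ("gyu", "ぎゅ"), ("gyo", "ぎょ"),
  ("ja", "じゃ"), ("ju", "じゅ"), ("jo", "じょ"),
  ("bya", "びゃ"), ("byu", "びゅ"), ("byo", "びょ"),
  ("pya", "ぴゃ"), ("pyu", "ぴゅ"), ("pyo", "ぴょ"),
  ("wa", "わ"), ("wi", "うぃ"), ("we", "うぇ"), ("wo", "を"),
  ("vu", "ゔ"), ("ve", "ゔぇ"), ("vi", "ゔぃ"),
  ("si", "し"), ("ti", "ち"), ("di", "ぢ"),
  ("chi", "ち"), ("tsu", "つ"), ("tu", "つ"),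
  ("a", "あ"), ("e", "え"), ("i", "い"), ("o", "お"), ("u", "う")]

-- the module-level dict literal (duplicate keys overwrite in place, as in Python)
def alphabet_to_hiragana : PySem.Dict String String :=
  hiraganaPairs.foldl (fun d p => d.insert p.1 p.2) PySem.Dict.empty

-- the while loop over index i, as structural recursion on the remaining characters
def convert_to_hiragana_goA : List Char → List Char
  | [] => []
  | c :: rest =>
    if 1 ≤ rest.length ∧ alphabet_to_hiragana.contains (String.ofList (PySem.Chars.lower ((c :: rest).take 2))) = true then
      (alphabet_to_hiragana.getD (String.ofList (PySem.Chars.lower ((c :: rest).take 2))) "").toList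
        ++ convert_to_hiragana_goA ((c :: rest).drop 2)
    else if 2 ≤ rest.length ∧ alphabet_to_hiragana.contains (String.ofList (PySem.Chars.lower ((c :: rest).take 3))) = true then
      (alphabet_to_hiragana.getD (String.ofList (PySem.Chars.lower ((c :: rest).take 3))) "").toList
        ++ convert_to_hiragana_goA ((c :: rest).drop 3)
    else if alphabet_to_hiragana.contains (String.ofList (PySem.Chars.lower [c])) = true then
      (alphabet_to_hiragana.getD (String.ofList (PySem.Chars.lower [c])) "").toList
        ++ convert_to_hiragana_goA ((c :: rest).drop 1)
    else
      c :: convert_to_hiragana_goA ((c :: rest).drop 1)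
  termination_by l => l.length
  decreasing_by all_goals (simp only [List.length_drop, List.length_cons]; omega)

def convert_to_hiragana (text : String) : String :=
  String.ofList (convert_to_hiragana_goA text.toList)

-- ===== PORT B =====
-- Source B builds the table row by row; 'row(prefix, vowels, kana, irregular)' is this fold
def bRow (t : PySem.Dict String String) (pre : String) (vowels kana : List String)
    (irr : PySem.Dict String String) : PySem.Dict String String :=
  (vowels.zip kana).foldl (fun t vk => t.insert (irr.getD vk.1 (pre ++ vk.1)) vk.2) t

def bNoIrr : PySem.Dict String String := PySem.Dict.empty

-- Source B: _table = _build_table()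
def bTable : PySem.Dict String String :=
  let t := bRow PySem.Dict.empty "" ["a","i","u","e","o"] ["あ","い","う","え","お"] bNoIrr
  let t := bRow t "k" ["a","i","u","e","o"] ["か","き","く","け","こ"] bNoIrr
  let t := bRow t "s" ["a","i","u","e","o"] ["さ","し","す","せ","そ"] (PySem.Dict.mk [("i","shi")])
  let t := bRow t "t" ["a","i","u","e","o"] ["た","ち","つ","て","と"] (PySem.Dict.mk [("i","chi"),("u","tsu")])
  let t := bRow t "n" ["a","i","u","e","o"] ["な","に","ぬ","ね","の"] bNoIrr
  let t := bRow t "h" ["a","i","u","e","o"] ["は","ひ","ふ","へ","ほ"] (PySem.Dict.mk [("u","fu")])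
  let t := bRow t "m" ["a","i","u","e","o"] ["ま","み","む","め","も"] bNoIrr
  let t := bRow t "y" ["a","u","o"] ["や","ゆ","よ"] bNoIrr
  let t := bRow t "r" ["a","i","u","e","o"] ["ら","り","る","れ","ろ"] bNoIrr
  let t := bRow t "w" ["a","o"] ["わ","を"] bNoIrr
  let t := bRow t "g" ["a","i","u","e","o"] ["が","ぎ","ぐ","げ","ご"] bNoIrr
  let t := bRow t "z" ["a","i","u","e","o"] ["ざ","じ","ず","ぜ","ぞ"] (PySem.Dict.mk [("i","ji"),("u","zu")])
  let t := bRow t "d" ["a","i","u","e","o"] ["だ","ぢ","づ","で","ど"] (PySem.Dict.mk [("i","ji"),("u","zu")])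
  let t := bRow t "b" ["a","i","u","e","o"] ["ば","び","ぶ","べ","ぼ"] bNoIrr
  let t := bRow t "p" ["a","i","u","e","o"] ["ぱ","ぴ","ぷ","ぺ","ぽ"] bNoIrr
  let t := [("ky","き"),("sh","し"),("ch","ち"),("ny","に"),("hy","ひ"),("my","み"),
            ("ry","り"),("gy","ぎ"),("j","じ"),("by","び"),("py","ぴ")].foldl
    (fun t pb => bRow t pb.1 ["a","u","o"] [pb.2 ++ "ゃ", pb.2 ++ "ゅ", pb.2 ++ "ょ"] bNoIrr) t
  bRow t "" ["n","wi","we","vu","ve","vi","si","ti","di","tu"]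
            ["ん","うぃ","うぇ","ゔ","ゔぇ","ゔぃ","し","ち","ぢ","つ"] bNoIrr

-- Source B: _pattern = re.compile("|".join(sorted(_table, key=lambda k: -len(k))), re.IGNORECASE)
def bSortedKeys : List String :=
  PySem.List.sorted bTable.keys (fun k => -(PySem.Str.len k)) false

-- 'alternative k matches here under re.IGNORECASE': exact for these all-lowercase-ASCII-letter keys
def bMatch (k : String) (l : List Char) : Bool :=
  PySem.Chars.lower (l.take k.toList.length) == k.toList

-- every key is nonempty (used only for termination of the scan below)
set_option maxRecDepth 100000 in
theorem bKeyLen_pos : ∀ k ∈ bSortedKeys, 1 ≤ k.toList.length := by decide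

-- _pattern.sub(lambda m: _table[m.group(0).lower()], text), ported by hand, exact
-- for this pattern: at each position the regex engine tries the alternatives left to right
-- (longest first, by construction) and takes the first that matches; on no match the character
-- is left untouched and scanning resumes at the next position.
set_option maxRecDepth 8192 in
def convert_to_hiragana_goB : List Char → List Char
  | [] => []
  | c :: rest =>
    match h : bSortedKeys.find? (fun k => bMatch k (c :: rest)) with
    | some k =>
      (bTable.getD (String.ofList (PySem.Chars.lower ((c :: rest).take k.toList.length))) "").toList
        ++ convert_to_hiragana_goB ((c :: rest).drop k.toList.length)
    | none => c :: convert_to_hiragana_goB rest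
  termination_by l => l.length
  decreasing_by
  · have hk := bKeyLen_pos k (List.mem_of_find?_eq_some h)
    simp only [List.length_drop, List.length_cons]
    omega
  · simp

def convert_to_hiragana_alt (text : String) : String :=
  String.ofList (convert_to_hiragana_goB text.toList)

-- ===== PRECONDITION & SPEC =====
def Spec_convert_to_hiragana (text : String) (out : String) : Prop := out = convert_to_hiragana_alt text
instance (text : String) (out : String) : Decidable (Spec_convert_to_hiragana text out) := by unfold Spec_convert_to_hiragana; infer_instance

-- ===== CLAIM (what is proved, stated in full; the proofs are below) =====
def Claim_equal_convert_to_hiragana : Prop := ∀ (text : String), Dom_convert_to_hiragana text → Spec_convert_to_hiragana text (convert_to_hiragana text)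

-- ===== LEMMAS AND PROOFS =====

set_option maxRecDepth 100000 in
theorem hiragana_dict_eq : alphabet_to_hiragana = PySem.Dict.mk [("ka", "か"), ("ki", "き"), ("ku", "く"), ("ke", "け"), ("ko", "こ"), ("sa", "さ"), ("shi", "し"), ("su", "す"), ("se", "せ"), ("so", "そ"), ("ta", "た"), ("chi", "ち"), ("tsu", "つ"), ("te", "て"), ("to", "と"), ("na", "な"), ("ni", "に"), ("nu", "ぬ"), ("ne", "ね"), ("no", "の"), ("ha", "は"), ("hi", "ひ"), ("fu", "ふ"), ("he", "へ"), ("ho", "ほ"), ("ma", "ま"), ("mi", "み"), ("mu", "む"), ("me", "め"), ("mo", "も"), ("ya", "や"), ("yu", "ゆ"), ("yo", "よ"), ("ra", "ら"), ("ri", "り"), ("ru", "る"), ("re", "れ"), ("ro", "ろ"), ("wa", "わ"), ("wo", "を"), ("n", "ん"), ("ga", "が"), ("gi", "ぎ"), ("gu", "ぐ"), ("ge", "げ"), ("go", "ご"), ("za", "ざ"), ("ji", "ぢ"), ("zu", "づ"), ("ze", "ぜ"), ("zo", "ぞ"), ("da", "だ"), ("de", "で"), ("do", "ど"), ("ba",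 "ば"), ("bi", "び"), ("bu", "ぶ"), ("be", "べ"), ("bo", "ぼ"), ("pa", "ぱ"), ("pi", "ぴ"), ("pu", "ぷ"), ("pe", "ぺ"), ("po", "ぽ"), ("kya", "きゃ"), ("kyu", "きゅ"), ("kyo", "きょ"), ("sha", "しゃ"), ("shu", "しゅ"), ("sho", "しょ"), ("cha", "ちゃ"), ("chu", "ちゅ"), ("cho", "ちょ"), ("nya", "にゃ"), ("nyu", "にゅ"), ("nyo", "にょ"), ("hya", "ひゃ"), ("hyu", "ひゅ"), ("hyo", "ひょ"), ("mya", "みゃ"), ("myu", "みゅ"), ("myo", "みょ"), ("rya", "りゃ"), ("ryu", "りゅ"), ("ryo", "りょ"), ("gya", "ぎゃ"), ("gyu", "ぎゅ"), ("gyo", "ぎょ"), ("ja", "じゃ"), ("ju", "じゅ"), ("jo", "じょ"), ("bya", "びゃ"), ("byu", "びゅ"), ("byo", "びょ"), ("pya", "ぴゃ"), ("pyu", "ぴゅ"), ("pyo", "ぴょ"), ("wi", "うぃ"), ("we", "うぇ"), ("vu", "ゔ"), ("ve", "ゔぇ"), ("vi", "ゔぃ"), ("si", "し"), ("ti", "ち"),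 ("di", "ぢ"), ("tu", "つ"), ("a", "あ"), ("e", "え"), ("i", "い"), ("o", "お"), ("u", "う")] := by decide

set_option maxRecDepth 100000 in
theorem b_skeys_eq : bSortedKeys = ["shi", "chi", "tsu", "kya", "kyu", "kyo", "sha", "shu", "sho", "cha", "chu", "cho", "nya", "nyu", "nyo", "hya", "hyu", "hyo", "mya", "myu", "myo", "rya", "ryu", "ryo", "gya", "gyu", "gyo", "bya", "byu", "byo", "pya", "pyu", "pyo", "ka", "ki", "ku", "ke", "ko", "sa", "su", "se", "so", "ta", "te", "to", "na", "ni", "nu", "ne", "no", "ha", "hi", "fu", "he", "ho", "ma", "mi", "mu", "me", "mo", "ya", "yu", "yo", "ra", "ri", "ru", "re", "ro", "wa", "wo", "ga", "gi", "gu", "ge", "go", "za", "ji", "zu", "ze", "zo", "da", "de", "do", "ba", "bi", "bu", "be", "bo", "pa", "pi", "pu", "pe", "po", "ja", "ju", "jo", "wi", "we", "vu", "ve", "vi", "si", "ti", "di", "tu", "a", "i", "u", "e", "o", "n"] := by decide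

set_option maxRecDepth 100000 in
theorem hK1 : ∀ k ∈ bSortedKeys, 1 ≤ k.toList.length ∧ k.toList.length ≤ 3 := by
  rw [b_skeys_eq]; decide

set_option maxRecDepth 100000 in
theorem hK2a : ∀ k ∈ bSortedKeys, alphabet_to_hiragana.contains k = true := by
  rw [b_skeys_eq, hiragana_dict_eq]; decide

set_option maxRecDepth 100000 in
theorem hK2b : ∀ k ∈ alphabet_to_hiragana.keys, k ∈ bSortedKeys := by
  rw [b_skeys_eq, hiragana_dict_eq]; decide

set_option maxRecDepth 100000 in
theorem hK3 : bSortedKeys.Pairwise (fun a b => b.toList.length ≤ a.toList.length) := by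
  rw [b_skeys_eq]; decide

-- no 2-character key is a prefix of a 3-character key
set_option maxRecDepth 100000 in
theorem hK4 : ∀ a ∈ bSortedKeys, ∀ b ∈ bSortedKeys,
    a.toList.length = 2 → b.toList.length = 3 → b.toList.take 2 ≠ a.toList := by
  rw [b_skeys_eq]; decide

-- on the (shared) key set the generated table agrees with A's dict literal
set_option maxRecDepth 100000 in
theorem hVal : ∀ k ∈ bSortedKeys, bTable.getD k "" = alphabet_to_hiragana.getD k "" := by
  rw [b_skeys_eq, hiragana_dict_eq]; decide

theorem lower_length (l : List Char) : (PySem.Chars.lower l).length = l.length := by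
  simp [PySem.Chars.lower]

theorem lower_take_take (l : List Char) {m n : Nat} (h : m ≤ n) :
    (PySem.Chars.lower (l.take n)).take m = PySem.Chars.lower (l.take m) := by
  simp [PySem.Chars.lower, List.take_take, Nat.min_eq_left h]

theorem match_shape {k : String} {l : List Char} (h : bMatch k l = true) :
    k.toList = PySem.Chars.lower (l.take k.toList.length) ∧ k.toList.length ≤ l.length := by
  have he : PySem.Chars.lower (l.take k.toList.length) = k.toList := by
    simpa [bMatch] using h
  refine ⟨he.symm, ?_⟩
  have := congrArg List.length he
  rw [lower_length, List.length_take] at this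
  omega

theorem match_fix {k : String} {l : List Char} {m : Nat} (hp : bMatch k l = true)
    (hm : k.toList.length = m) :
    k = String.ofList (PySem.Chars.lower (l.take m)) ∧ m ≤ l.length := by
  obtain ⟨he, hle⟩ := match_shape hp
  rw [hm] at he hle
  refine ⟨?_, hle⟩
  apply String.toList_inj.mp
  simp [he]

theorem find?_longest (ks : List String) (p : String → Bool) (k0 : String)
    (hmem : k0 ∈ ks) (hp : p k0 = true)
    (hle : ∀ k ∈ ks, p k = true → k.toList.length ≤ k0.toList.length)
    (huniq : ∀ k ∈ ks, p k = true → k.toList.length = k0.toList.length → k = k0)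
    (hsorted : ks.Pairwise (fun a b => b.toList.length ≤ a.toList.length)) :
    ks.find? p = some k0 := by
  induction ks with
  | nil => cases hmem
  | cons a t ih =>
    rcases List.mem_cons.mp hmem with rfl | hmem'
    · simp [List.find?_cons_of_pos, hp]
    · by_cases hpa : p a = true
      · have h1 := hle a (List.mem_cons_self) hpa
        have h2 : k0.toList.length ≤ a.toList.length :=
          (List.pairwise_cons.mp hsorted).1 k0 hmem'
        have := huniq a (List.mem_cons_self) hpa (Nat.le_antisymm h1 h2)
        subst this
        simp [List.find?_cons_of_pos, hpa]
      · rw [List.find?_cons_of_neg (by simpa using hpa)]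
        exact ih hmem' (fun k hk hp' => hle k (List.mem_cons_of_mem a hk) hp')
          (fun k hk hp' => huniq k (List.mem_cons_of_mem a hk) hp')
          (List.pairwise_cons.mp hsorted).2

-- a key that matches at this position is in the dict, its romaji is the lowered slice, and it fits
theorem match_pos {c : Char} {rest : List Char} {k : String} {m : Nat}
    (hk : k ∈ bSortedKeys) (hpk : bMatch k (c :: rest) = true)
    (hm : k.toList.length = m) :
    k = String.ofList (PySem.Chars.lower ((c :: rest).take m)) ∧ m ≤ rest.length + 1 ∧
      alphabet_to_hiragana.contains (String.ofList (PySem.Chars.lower ((c :: rest).take m))) = true := by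
  obtain ⟨hkeq, hle⟩ := match_fix hpk hm
  refine ⟨hkeq, by simpa using hle, ?_⟩
  rw [← hkeq]; exact hK2a k hk

theorem goA_eq_goB : ∀ l : List Char, convert_to_hiragana_goA l = convert_to_hiragana_goB l
  | [] => by simp [convert_to_hiragana_goA, convert_to_hiragana_goB]
  | c :: rest => by
    have IH : ∀ m : List Char, m.length < (c :: rest).length →
        convert_to_hiragana_goA m = convert_to_hiragana_goB m := fun m hm => goA_eq_goB m
    by_cases h2 : 1 ≤ rest.length ∧ alphabet_to_hiragana.contains (String.ofList (PySem.Chars.lower ((c :: rest).take 2))) = true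
    · -- A takes the 2-character combination; the scan finds it first
      have hs2t : (String.ofList (PySem.Chars.lower ((c :: rest).take 2))).toList
          = PySem.Chars.lower ((c :: rest).take 2) := by simp
      have hs2len : (String.ofList (PySem.Chars.lower ((c :: rest).take 2))).toList.length = 2 := by
        rw [hs2t, lower_length, List.length_take]; simp; omega
      have hmem : String.ofList (PySem.Chars.lower ((c :: rest).take 2)) ∈ bSortedKeys :=
        hK2b _ ((PySem.Dict.contains_iff_mem_keys _ _).mp h2.2)
      have hp : bMatch (String.ofList (PySem.Chars.lower ((c :: rest).take 2))) (c :: rest) = true := by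
        unfold bMatch; rw [hs2len, hs2t]; exact beq_self_eq_true _
      have hfind := find?_longest bSortedKeys (fun k => bMatch k (c :: rest)) _ hmem hp
        (by
          intro k hk hpk
          rw [hs2len]
          rcases hK1 k hk with ⟨hk1, hk3⟩
          by_contra hgt
          have h3 : k.toList.length = 3 := by omega
          obtain ⟨he, _⟩ := match_shape hpk
          rw [h3] at he
          exact hK4 _ hmem k hk hs2len h3 (by rw [he, lower_take_take _ (by omega), hs2t]))
        (by
          intro k hk hpk hlen
          rw [hs2len] at hlen
          exact (match_fix hpk hlen).1)
        hK3
      rw [convert_to_hiragana_goA, if_pos h2, convert_to_hiragana_goB]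
      split
      · next k heq =>
          rw [hfind] at heq
          obtain rfl : String.ofList (PySem.Chars.lower ((c :: rest).take 2)) = k := by
            simpa using heq
          rw [hs2len]
          rw [hVal _ hmem, IH _ (by simp only [List.length_drop, List.length_cons]; omega)]
      · next heq => rw [hfind] at heq; cases heq
    · by_cases h3 : 2 ≤ rest.length ∧ alphabet_to_hiragana.contains (String.ofList (PySem.Chars.lower ((c :: rest).take 3))) = true
      · -- A takes the 3-character combination; no shorter key can come first
        have hs3t : (String.ofList (PySem.Chars.lower ((c :: rest).take 3))).toList
            = PySem.Chars.lower ((c :: rest).take 3) := by simp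
        have hs3len : (String.ofList (PySem.Chars.lower ((c :: rest).take 3))).toList.length = 3 := by
          rw [hs3t, lower_length, List.length_take]; simp; omega
        have hmem : String.ofList (PySem.Chars.lower ((c :: rest).take 3)) ∈ bSortedKeys :=
          hK2b _ ((PySem.Dict.contains_iff_mem_keys _ _).mp h3.2)
        have hp : bMatch (String.ofList (PySem.Chars.lower ((c :: rest).take 3))) (c :: rest) = true := by
          unfold bMatch; rw [hs3len, hs3t]; exact beq_self_eq_true _
        have hfind := find?_longest bSortedKeys (fun k => bMatch k (c :: rest)) _ hmem hp
          (by
            intro k hk hpk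
            rw [hs3len]
            exact (hK1 k hk).2)
          (by
            intro k hk hpk hlen
            rw [hs3len] at hlen
            exact (match_fix hpk hlen).1)
          hK3
        rw [convert_to_hiragana_goA, if_neg h2, if_pos h3, convert_to_hiragana_goB]
        split
        · next k heq =>
            rw [hfind] at heq
            obtain rfl : String.ofList (PySem.Chars.lower ((c :: rest).take 3)) = k := by
              simpa using heq
            rw [hs3len]
            rw [hVal _ hmem, IH _ (by simp only [List.length_drop, List.length_cons]; omega)]
        · next heq => rw [hfind] at heq; cases heq
      · by_cases h1 : alphabet_to_hiragana.contains (String.ofList (PySem.Chars.lower [c])) = true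
        · -- A takes the single character; no 2- or 3-character key matches here
          have htake1 : (c :: rest).take 1 = [c] := rfl
          have hs1t : (String.ofList (PySem.Chars.lower [c])).toList = PySem.Chars.lower [c] := by simp
          have hs1len : (String.ofList (PySem.Chars.lower [c])).toList.length = 1 := by
            rw [hs1t, lower_length]; rfl
          have hmem : String.ofList (PySem.Chars.lower [c]) ∈ bSortedKeys :=
            hK2b _ ((PySem.Dict.contains_iff_mem_keys _ _).mp h1)
          have hp : bMatch (String.ofList (PySem.Chars.lower [c])) (c :: rest) = true := by
            unfold bMatch; rw [hs1len, hs1t, htake1]; exact beq_self_eq_true _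
          have hfind := find?_longest bSortedKeys (fun k => bMatch k (c :: rest)) _ hmem hp
            (by
              intro k hk hpk
              rw [hs1len]
              rcases hK1 k hk with ⟨hk1, hk3⟩
              by_contra hgt
              rcases (by omega : k.toList.length = 2 ∨ k.toList.length = 3) with hm | hm
              · obtain ⟨-, hle', hct⟩ := match_pos hk hpk hm
                exact h2 ⟨by omega, hct⟩
              · obtain ⟨-, hle', hct⟩ := match_pos hk hpk hm
                exact h3 ⟨by omega, hct⟩)
            (by
              intro k hk hpk hlen
              rw [hs1len] at hlen
              have := (match_fix hpk hlen).1
              rwa [htake1] at this)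
            hK3
          rw [convert_to_hiragana_goA, if_neg h2, if_neg h3, if_pos h1, convert_to_hiragana_goB]
          split
          · next k heq =>
              rw [hfind] at heq
              obtain rfl : String.ofList (PySem.Chars.lower [c]) = k := by simpa using heq
              rw [hs1len, htake1]
              rw [hVal _ hmem, IH _ (by simp only [List.length_drop, List.length_cons]; omega)]
          · next heq => rw [hfind] at heq; cases heq
        · -- no key matches at this position: both keep the character
          have hfind : bSortedKeys.find? (fun k => bMatch k (c :: rest)) = none := by
            rw [List.find?_eq_none]
            intro k hk hpk
            rcases hK1 k hk with ⟨hk1, hk3⟩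
            rcases (by omega : k.toList.length = 1 ∨ k.toList.length = 2 ∨ k.toList.length = 3) with hm | hm | hm
            · obtain ⟨hkeq, -, hct⟩ := match_pos hk hpk hm
              rw [List.take_one] at hct
              exact h1 (by simpa using hct)
            · obtain ⟨-, hle', hct⟩ := match_pos hk hpk hm
              exact h2 ⟨by omega, hct⟩
            · obtain ⟨-, hle', hct⟩ := match_pos hk hpk hm
              exact h3 ⟨by omega, hct⟩
          rw [convert_to_hiragana_goA, if_neg h2, if_neg h3, if_neg h1, convert_to_hiragana_goB]
          split
          · next k heq => rw [hfind] at heq; cases heq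
          · next heq =>
              rw [List.drop_one, List.tail_cons, IH rest (by simp)]
  termination_by l => l.length
  decreasing_by exact hm

-- ===== VERDICT (by name: the statement is the Claim_ definition above) =====
theorem convert_to_hiragana_spec : Claim_equal_convert_to_hiragana := by
  intro text _
  unfold Spec_convert_to_hiragana convert_to_hiragana convert_to_hiragana_alt
  rw [goA_eq_goB]
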